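-- pv_equiv track=rewrite | github.com/JXZGitHub/LC | findLeftMost1ColInMatrix.py | leftMostColumn
-- ===== SOURCE A (Python) =====
-- def leftMostColumn(m):
--     '''
--     :param m:
--     :return:
--     Time: O(M*N)
--     Space: (1)
--     '''
--     row = 0
--     col = len(m[0]) - 1
--     while row<len(m):
--         while col>0 and m[row][col-1] == 1:
--             col -= 1
--         row +=1
--     return col
-- ===== SOURCE B (Python) =====
-- def leftMostColumn(m):
--     col = len(m[0]) - 1
--     for row in m:
--         if col > 0:
--             run = 0
--             for x in row[:col]:
--                 run = run + 1 if x == 1 else 0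
--             col -= run
--     return col
-- ===== Notes on version B (the rewrite author's own statement) =====
-- stated objective: alternative
-- what changed: A walks one non-resetting column pointer right-to-left across rows; B instead scans each row's prefix left-to-right with a run-length DP (length of the consecutive-1s run ending at col-1) and subtracts it from col, so the traversal direction and maintained state differ.
-- outside the precondition, e.g. on leftMostColumn([[1, 1, 1], [0]]): A returns 0, B returns 0
import Mathlib
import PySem

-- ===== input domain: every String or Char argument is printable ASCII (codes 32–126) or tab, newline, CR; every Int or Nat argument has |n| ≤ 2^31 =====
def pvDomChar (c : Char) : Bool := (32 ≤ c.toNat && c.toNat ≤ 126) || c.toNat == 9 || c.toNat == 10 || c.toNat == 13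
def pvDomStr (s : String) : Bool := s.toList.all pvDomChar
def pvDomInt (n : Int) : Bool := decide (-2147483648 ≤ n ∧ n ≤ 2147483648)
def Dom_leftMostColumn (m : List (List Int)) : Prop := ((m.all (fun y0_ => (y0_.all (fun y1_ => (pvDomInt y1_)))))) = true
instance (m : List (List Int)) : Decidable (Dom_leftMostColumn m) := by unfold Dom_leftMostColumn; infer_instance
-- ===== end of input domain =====

-- B replaces A's single right-to-left monotone column pointer by a per-row left-to-right
-- run-length scan of the prefix row[:col]; alternative traversal, same result.


-- ===== PORT A =====
-- inner while: `while col>0 and m[row][col-1] == 1: col -= 1`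
-- (out-of-range access would be an IndexError in Python; Pre_ excludes it, `.getD 0` here)
def pvInnerA (row : List Int) (col : Int) : Int :=
  if h : 0 < col ∧ (PySem.List.pyGet? row (col - 1)).getD 0 = 1 then
    pvInnerA row (col - 1)
  else col
termination_by col.toNat
decreasing_by omega

-- `col = len(m[0]) - 1` (m[0] raises IndexError on empty m; Pre_ excludes it),
-- then `while row<len(m)` advances row by row = fold over the rows.
def leftMostColumn (m : List (List Int)) : Int :=
  m.foldl (fun col row => pvInnerA row col)
    (((PySem.List.pyGet? m 0).getD []).length - 1)

-- ===== PORT B =====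
-- `run = run + 1 if x == 1 else 0` folded over `row[:col]`
def pvRunB (pre : List Int) : Int :=
  pre.foldl (fun run x => if x = 1 then run + 1 else 0) 0

def leftMostColumn_alt (m : List (List Int)) : Int :=
  m.foldl (fun col row =>
      if 0 < col then col - pvRunB (PySem.List.slice row none (some col)) else col)
    (((PySem.List.pyGet? m 0).getD []).length - 1)

-- ===== PRECONDITION & SPEC =====
-- Pre_ excludes the empty matrix (A raises IndexError on len(m[0])) and ragged matrices with a
-- row shorter than len(m[0])-1, on which A's pointer walk can raise IndexError; on the excluded
-- ragged inputs where the pointer happens to stop before the short row, A still returns (Pre_ is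
-- narrower than its reason there) and B returns the same value.
def Pre_leftMostColumn (m : List (List Int)) : Prop :=
  m ≠ [] ∧ ∀ r ∈ m, (m.headD []).length ≤ r.length + 1
instance (m : List (List Int)) : Decidable (Pre_leftMostColumn m) := by
  unfold Pre_leftMostColumn; infer_instance

def pvWitness_leftMostColumn : List (List Int) := [[0, 0, 1], [0, 1, 1]]

def Spec_leftMostColumn (m : List (List Int)) (out : Int) : Prop := out = leftMostColumn_alt m
instance (m : List (List Int)) (out : Int) : Decidable (Spec_leftMostColumn m out) := by
  unfold Spec_leftMostColumn; infer_instance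

-- ===== CLAIM (what is proved, stated in full; the proofs are below) =====
def Claim_equal_leftMostColumn : Prop :=
  ∀ (m : List (List Int)), Dom_leftMostColumn m → Pre_leftMostColumn m →
    Spec_leftMostColumn m (leftMostColumn m)

-- ===== LEMMAS AND PROOFS =====

-- run length of the consecutive-1s block ending at the end of `pre`, via the DP fold
theorem pvRunB_nonneg (pre : List Int) : 0 ≤ pvRunB pre := by
  unfold pvRunB
  suffices h : ∀ a : Int, 0 ≤ a → 0 ≤ pre.foldl (fun run x => if x = 1 then run + 1 else 0) a by
    exact h 0 le_rfl
  induction pre with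
  | nil => intro a ha; simpa using ha
  | cons x xs ih =>
      intro a ha
      simp only [List.foldl_cons]
      apply ih
      split <;> omega

theorem pvRunB_append_one (pre : List Int) :
    pvRunB (pre ++ [1]) = pvRunB pre + 1 := by
  unfold pvRunB; simp

theorem pvRunB_append_ne (pre : List Int) (x : Int) (hx : x ≠ 1) :
    pvRunB (pre ++ [x]) = 0 := by
  unfold pvRunB; simp [hx]

-- per-row equality: A's right-to-left walk equals col minus B's run length of row[:col]
theorem innerA_eq (row : List Int) (col : Int)
    (hle : col ≤ (row.length : Int)) :
    pvInnerA row col = if 0 < col then col - pvRunB (row.take col.toNat) else col := by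
  by_cases hpos : 0 < col
  · -- strong induction on col.toNat
    obtain ⟨c, hc⟩ : ∃ c : ℕ, col = (c : Int) := ⟨col.toNat, by omega⟩
    subst hc
    induction c with
    | zero => omega
    | succ k ih =>
        push_cast
        have hk : ((k : Int) + 1).toNat = k + 1 := by omega
        have hkl : k < row.length := by exact_mod_cast by push_cast at hle ⊢; omega
        have htake : row.take (k + 1) = row.take k ++ [row[k]] := by
          rw [List.take_add_one, List.getElem?_eq_getElem hkl]; rfl
        have hget : (PySem.List.pyGet? row ((k : Int) + 1 - 1)).getD 0 = row[k] := by
          have : ((k : Int) + 1 - 1) = (k : Int) := by ring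
          rw [this, PySem.List.pyGet?_natCast, List.getElem?_eq_getElem hkl]; rfl
        rw [pvInnerA]
        by_cases h1 : row[k] = (1 : Int)
        · have hcond : 0 < (k : Int) + 1 ∧ (PySem.List.pyGet? row ((k:Int) + 1 - 1)).getD 0 = 1 := by
            constructor
            · positivity
            · rw [hget]; exact h1
          rw [dif_pos hcond]
          have hstep : (k : Int) + 1 - 1 = (k : Int) := by ring
          rw [hstep]
          have hrun : pvRunB (row.take (((k:Int)+1).toNat)) =
              pvRunB (row.take k) + 1 := by
            rw [hk, htake, h1, pvRunB_append_one]
          by_cases hk0 : 0 < (k : Int)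
          · have := ih (by omega) hk0
            rw [this, if_pos hk0, if_pos (by positivity : (0:Int) < (k:Int)+1)]
            have : ((k : Int)).toNat = k := by omega
            rw [this] at *
            omega
          · have hk0' : (k : Int) = 0 := by omega
            have : k = 0 := by exact_mod_cast hk0'
            subst this
            rw [pvInnerA, dif_neg (by norm_num)]
            rw [if_pos (by positivity : (0:Int) < ((0:ℕ):Int) + 1)]
            simp only [List.take_zero] at hrun
            have h0 : pvRunB ([] : List Int) = 0 := rfl
            rw [h0] at hrun
            omega
        · have hcond : ¬ (0 < (k : Int) + 1 ∧ (PySem.List.pyGet? row ((k:Int) + 1 - 1)).getD 0 = 1) := by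
            rw [hget]; tauto
          rw [dif_neg hcond, if_pos (by positivity : (0:Int) < (k:Int)+1)]
          have hrun : pvRunB (row.take (((k:Int)+1).toNat)) = 0 := by
            rw [hk, htake, pvRunB_append_ne _ _ h1]
          omega
  · rw [pvInnerA, dif_neg (by tauto), if_neg hpos]

-- the fold: one step agrees on any col within every row's length bound
theorem fold_eq (rows : List (List Int)) (col : Int)
    (hall : ∀ r ∈ rows, col ≤ (r.length : Int)) :
    rows.foldl (fun col row => pvInnerA row col) col =
    rows.foldl (fun col row =>
      if 0 < col then col - pvRunB (PySem.List.slice row none (some col)) else col) col := by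
  induction rows generalizing col with
  | nil => rfl
  | cons r rs ih =>
      simp only [List.foldl_cons]
      have hr : col ≤ (r.length : Int) := hall r (by simp)
      have hstep : pvInnerA r col =
          if 0 < col then col - pvRunB (PySem.List.slice r none (some col)) else col := by
        by_cases hpos : 0 < col
        · have hcol : col = ((col.toNat : ℕ) : Int) := by omega
          rw [hcol, PySem.List.slice_to_natCast]
          rw [← hcol]
          exact innerA_eq r col hr
        · rw [if_neg hpos, pvInnerA, dif_neg (by tauto)]
      rw [hstep]
      -- new col after the step is ≤ col, so the bound still holds for the tail
      have hnew : (if 0 < col then col - pvRunB (PySem.List.slice r none (some col)) else col) ≤ col := by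
        split
        · have := pvRunB_nonneg (PySem.List.slice r none (some col)); omega
        · exact le_rfl
      exact ih _ (fun q hq => le_trans hnew (hall q (by simp [hq])))

-- ===== VERDICT (by name: the statement is the Claim_ definition above) =====
theorem leftMostColumn_spec : Claim_equal_leftMostColumn := by
  intro m _hdom hpre
  obtain ⟨hne, hrows⟩ := hpre
  unfold Spec_leftMostColumn leftMostColumn leftMostColumn_alt
  obtain ⟨r0, rs, rfl⟩ := List.exists_cons_of_ne_nil hne
  apply fold_eq
  intro r hr
  have := hrows r hr
  simp only [List.headD_cons] at this
  have hget : (PySem.List.pyGet? (r0 :: rs) 0).getD [] = r0 := by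
    simp [PySem.List.pyGet?, PySem.List.pyIdx?]
  rw [hget]
  omega
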